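-- pv_equiv track=rewrite | github.com/LuisGC/advent-of-code | 2023/day-14/main.py | move_west
-- ===== SOURCE A (Python) =====
-- from typing import List
--
-- def move_west(platform: List[List[str]]) -> List[List[str]]:
--     while True:
--         new_platform = platform.copy()
--         moves = 0
--         for i in range(len(platform)):
--             for j in range(1, len(platform[i])):
--                 c = platform[i][j]
--                 if c == 'O' and platform[i][j - 1] == '.':
--                     new_platform[i][j - 1] = 'O'
--                     new_platform[i][j] = '.'
--                     moves += 1
--         platform = new_platform.copy()
--         if moves == 0:
--             break
--
--     return platform
-- ===== SOURCE B (Python) =====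
-- from typing import List
--
-- def move_west(platform: List[List[str]]) -> List[List[str]]:
--     result = []
--     for row in platform:
--         new_row = []
--         o = 0
--         d = 0
--         for c in row:
--             if c == 'O':
--                 o += 1
--             elif c == '.':
--                 d += 1
--             else:
--                 new_row += ['O'] * o + ['.'] * d + [c]
--                 o = 0
--                 d = 0
--         new_row += ['O'] * o + ['.'] * d
--         result.append(new_row)
--     return result
-- ===== Notes on version B (the rewrite author's own statement) =====
-- stated objective: alternative
-- what changed: A repeatedly sweeps the whole grid, moving each 'O' one cell left per sweep until a sweep makes no move; B computes the fixed point directly in one left-to-right pass per row, counting 'O' and '.' cells within segments delimited by any other cell and emitting each packed segment at its delimiter.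
import Mathlib
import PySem

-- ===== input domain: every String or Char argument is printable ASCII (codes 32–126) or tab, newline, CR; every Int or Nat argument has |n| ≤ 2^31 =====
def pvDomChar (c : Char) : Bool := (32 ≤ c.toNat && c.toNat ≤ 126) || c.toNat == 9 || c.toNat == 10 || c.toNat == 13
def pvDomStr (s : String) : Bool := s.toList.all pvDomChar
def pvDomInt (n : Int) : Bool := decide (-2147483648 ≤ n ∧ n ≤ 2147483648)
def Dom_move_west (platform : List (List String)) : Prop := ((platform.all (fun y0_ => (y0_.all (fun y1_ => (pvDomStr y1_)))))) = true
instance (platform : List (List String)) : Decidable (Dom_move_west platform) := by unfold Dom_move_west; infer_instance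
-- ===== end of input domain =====

-- B replaces A's repeated whole-grid sweeps (one step per sweep, until no move) by a single
-- per-row pass packing the 'O's left within segments delimited by non-'O'/'.' cells.
-- A mutates the rows of its argument in place (shallow copy aliasing); the equivalence proved
-- here is about the RETURN value only — B does not mutate its argument.

-- ===== PORT A =====
-- one inner sweep of a row: `a` is the current value at the leading position, `rest` the
-- untouched suffix; Python's aliasing (new_platform shares row objects with platform) makes
-- each comparison read the already-updated cell, which is exactly this recursion
def pvGo (a : String) (rest : List String) : List String × Nat :=
  match rest with
  | [] => ([a], 0)
  | b :: t =>
    if b = "O" ∧ a = "." then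
      let r := pvGo "." t
      ("O" :: r.1, r.2 + 1)
    else
      let r := pvGo b t
      (a :: r.1, r.2)

def pvPassRow (row : List String) : List String × Nat :=
  match row with
  | [] => ([], 0)
  | a :: t => pvGo a t

-- one iteration of A's while-loop body: sweep every row, total the moves
def pvPass (p : List (List String)) : List (List String) × Nat :=
  match p with
  | [] => ([], 0)
  | row :: rest =>
    let r := pvPassRow row
    let q := pvPass rest
    (r.1 :: q.1, r.2 + q.2)

-- termination measure: sum over all cells of the index of each "O" in its row
def pvW (i : Nat) : List String → Nat
  | [] => 0
  | c :: t => (if c = "O" then i else 0) + pvW (i + 1) t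

def pvTW (p : List (List String)) : Nat := (p.map (pvW 0)).sum

-- each sweep removes exactly its move count from the measure (cited by decreasing_by)
theorem pvGo_W (rest : List String) : ∀ (a : String) (i : Nat),
    pvW i (pvGo a rest).1 + (pvGo a rest).2 = pvW i (a :: rest) := by
  induction rest with
  | nil => intro a i; simp [pvGo, pvW]
  | cons b t ih =>
    intro a i
    by_cases h : b = "O" ∧ a = "."
    · have h1 := ih "." (i + 1)
      simp only [pvGo, if_pos h, pvW] at h1 ⊢
      simp [h.1, h.2] at h1 ⊢
      omega
    · have h1 := ih b (i + 1)
      simp only [pvGo, if_neg h, pvW] at h1 ⊢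
      omega

theorem pvPass_W (p : List (List String)) :
    pvTW (pvPass p).1 + (pvPass p).2 = pvTW p := by
  induction p with
  | nil => simp [pvPass, pvTW]
  | cons row rest ih =>
    simp only [pvPass, pvTW, List.map_cons, List.sum_cons]
    have hrow : pvW 0 (pvPassRow row).1 + (pvPassRow row).2 = pvW 0 row := by
      cases row with
      | nil => simp [pvPassRow, pvW]
      | cons a t => simpa [pvPassRow, pvW] using pvGo_W t a 0
    simp only [pvTW] at ih
    omega

def move_west (platform : List (List String)) : List (List String) :=
  if (pvPass platform).2 = 0 then (pvPass platform).1 else move_west (pvPass platform).1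
termination_by pvTW platform
decreasing_by
  have h := pvPass_W platform
  omega

-- ===== PORT B =====
-- Source B's inner loop state: (new_row, o, d)
def pvStep (st : List String × Nat × Nat) (c : String) : List String × Nat × Nat :=
  if c = "O" then (st.1, st.2.1 + 1, st.2.2)
  else if c = "." then (st.1, st.2.1, st.2.2 + 1)
  else (st.1 ++ List.replicate st.2.1 "O" ++ List.replicate st.2.2 "." ++ [c], 0, 0)

def pvRowAlt (row : List String) : List String :=
  let s := row.foldl pvStep ([], 0, 0)
  s.1 ++ List.replicate s.2.1 "O" ++ List.replicate s.2.2 "."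

def move_west_alt (platform : List (List String)) : List (List String) :=
  platform.map pvRowAlt

-- ===== PRECONDITION & SPEC =====
def Spec_move_west (platform : List (List String)) (out : List (List String)) : Prop := out = move_west_alt platform
instance (platform : List (List String)) (out : List (List String)) : Decidable (Spec_move_west platform out) := by unfold Spec_move_west; infer_instance

-- ===== CLAIM (what is proved, stated in full; the proofs are below) =====
def Claim_equal_move_west : Prop := ∀ (platform : List (List String)), Dom_move_west platform → Spec_move_west platform (move_west platform)

-- ===== LEMMAS AND PROOFS =====

-- recursive form of B's per-row packing, used only in the proofs
def pvPack : Nat → Nat → List String → List String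
  | o, d, [] => List.replicate o "O" ++ List.replicate d "."
  | o, d, c :: t =>
    if c = "O" then pvPack (o + 1) d t
    else if c = "." then pvPack o (d + 1) t
    else List.replicate o "O" ++ List.replicate d "." ++ c :: pvPack 0 0 t

theorem pvPack_O {o d : Nat} {t : List String} :
    pvPack o d ("O" :: t) = pvPack (o + 1) d t := by
  simp [pvPack]

theorem pvPack_dot {o d : Nat} {t : List String} :
    pvPack o d ("." :: t) = pvPack o (d + 1) t := by
  simp [pvPack]

theorem pvPack_wall {o d : Nat} {c : String} {t : List String} (h1 : c ≠ "O") (h2 : c ≠ ".") :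
    pvPack o d (c :: t) = List.replicate o "O" ++ List.replicate d "." ++ c :: pvPack 0 0 t := by
  simp [pvPack, h1, h2]

-- B's foldl equals the recursive packing
theorem pvFold_pack (row : List String) : ∀ (acc : List String) (o d : Nat),
    (let s := row.foldl pvStep (acc, o, d);
      s.1 ++ List.replicate s.2.1 "O" ++ List.replicate s.2.2 ".") = acc ++ pvPack o d row := by
  induction row with
  | nil => intro acc o d; simp [pvPack]
  | cons c t ih =>
    intro acc o d
    by_cases h1 : c = "O"
    · subst h1
      simp only [List.foldl_cons, pvStep, if_pos rfl, pvPack_O, ih, if_true]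
    · by_cases h2 : c = "."
      · subst h2
        simp only [List.foldl_cons, pvStep, if_neg h1, if_pos rfl, pvPack_dot, ih, if_true]
      · simp only [List.foldl_cons, pvStep, if_neg h1, if_neg h2, pvPack_wall h1 h2, ih]
        simp

theorem pvRowAlt_eq_pack (row : List String) : pvRowAlt row = pvPack 0 0 row := by
  simpa [pvRowAlt] using pvFold_pack row [] 0 0

-- a sweep preserves the packed form
theorem pvPack_go (rest : List String) : ∀ (a : String) (o d : Nat),
    pvPack o d (pvGo a rest).1 = pvPack o d (a :: rest) := by
  induction rest with
  | nil => intro a o d; simp [pvGo]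
  | cons b t ih =>
    intro a o d
    by_cases h : b = "O" ∧ a = "."
    · simp only [pvGo, h.1, h.2]
      show pvPack o d ("O" :: (pvGo "." t).1) = pvPack o d ("." :: "O" :: t)
      rw [pvPack_O, ih, pvPack_dot, pvPack_dot, pvPack_O]
    · simp only [pvGo, if_neg h]
      show pvPack o d (a :: (pvGo b t).1) = pvPack o d (a :: b :: t)
      by_cases h1 : a = "O"
      · subst h1; rw [pvPack_O, ih, pvPack_O]
      · by_cases h2 : a = "."
        · subst h2; rw [pvPack_dot, ih, pvPack_dot]
        · rw [pvPack_wall h1 h2, ih, pvPack_wall h1 h2]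

-- a move-free sweep means the row is already packed
theorem pvPack_fixed (rest : List String) : ∀ (a : String) (o d : Nat),
    (pvGo a rest).2 = 0 → (a = "O" → d = 0) →
    pvPack o d (a :: rest) = List.replicate o "O" ++ List.replicate d "." ++ a :: rest := by
  induction rest with
  | nil =>
    intro a o d _ hg
    by_cases h1 : a = "O"
    · subst h1; rw [hg rfl, pvPack_O]
      simp [pvPack, List.replicate_succ']
    · by_cases h2 : a = "."
      · subst h2; rw [pvPack_dot]
        simp [pvPack, List.replicate_succ']
      · rw [pvPack_wall h1 h2]
        simp [pvPack]
  | cons b t ih =>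
    intro a o d hm hg
    have hnot : ¬ (b = "O" ∧ a = ".") := by
      intro h; simp only [pvGo, if_pos h] at hm; omega
    have hm' : (pvGo b t).2 = 0 := by
      simpa only [pvGo, if_neg hnot] using hm
    by_cases h1 : a = "O"
    · subst h1; rw [hg rfl, pvPack_O]
      rw [ih b (o + 1) 0 hm' (fun _ => rfl)]
      simp [List.replicate_succ']
    · by_cases h2 : a = "."
      · subst h2
        have hb : b ≠ "O" := fun hb => hnot ⟨hb, rfl⟩
        rw [pvPack_dot]
        rw [ih b o (d + 1) hm' (fun h => absurd h hb)]
        simp [List.replicate_succ']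
      · rw [pvPack_wall h1 h2]
        rw [ih b 0 0 hm' (fun _ => rfl)]
        simp

theorem pvGo_no_move (rest : List String) : ∀ (a : String),
    (pvGo a rest).2 = 0 → (pvGo a rest).1 = a :: rest := by
  induction rest with
  | nil => intro a _; simp [pvGo]
  | cons b t ih =>
    intro a hm
    have hnot : ¬ (b = "O" ∧ a = ".") := by
      intro h; simp only [pvGo, if_pos h] at hm; omega
    simp only [pvGo, if_neg hnot] at hm ⊢
    rw [ih b hm]

theorem pvPassRow_fixed (row : List String) (h : (pvPassRow row).2 = 0) :
    (pvPassRow row).1 = row ∧ pvPack 0 0 row = row := by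
  cases row with
  | nil => simp [pvPassRow, pvPack]
  | cons a t =>
    simp only [pvPassRow] at h ⊢
    refine ⟨pvGo_no_move t a h, ?_⟩
    simpa using pvPack_fixed t a 0 0 h (fun _ => rfl)

theorem pvPass_fst_map (p : List (List String)) :
    (pvPass p).1 = p.map (fun row => (pvPassRow row).1) := by
  induction p with
  | nil => simp [pvPass]
  | cons row rest ih => simp [pvPass, ih]

theorem pvPass_zero (p : List (List String)) (h : (pvPass p).2 = 0) :
    ∀ row ∈ p, (pvPassRow row).2 = 0 := by
  induction p with
  | nil => simp
  | cons row rest ih =>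
    simp only [pvPass] at h
    intro r hr
    rcases List.mem_cons.mp hr with h1 | h1
    · subst h1; omega
    · exact ih (by omega) r h1

theorem pvPass_pack (p : List (List String)) :
    (pvPass p).1.map (pvPack 0 0) = p.map (pvPack 0 0) := by
  rw [pvPass_fst_map, List.map_map]
  apply List.map_congr_left
  intro row _
  cases row with
  | nil => simp [pvPassRow]
  | cons a t => simpa [pvPassRow] using pvPack_go t a 0 0

theorem move_west_pack (p : List (List String)) :
    move_west p = p.map (pvPack 0 0) := by
  rw [move_west]
  by_cases h : (pvPass p).2 = 0
  · simp only [if_pos h]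
    have hall := pvPass_zero p h
    rw [pvPass_fst_map]
    have hfix : ∀ row ∈ p, (pvPassRow row).1 = row ∧ pvPack 0 0 row = row := by
      intro row hr; exact pvPassRow_fixed row (hall row hr)
    calc p.map (fun row => (pvPassRow row).1)
        = p.map (fun row => row) := List.map_congr_left (fun r hr => (hfix r hr).1)
      _ = p.map (pvPack 0 0) := by
          symm; exact List.map_congr_left (fun r hr => (hfix r hr).2)
  · simp only [if_neg h]
    rw [move_west_pack (pvPass p).1, pvPass_pack]
termination_by pvTW p
decreasing_by
  have := pvPass_W p
  omega

-- ===== VERDICT (by name: the statement is the Claim_ definition above) =====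
theorem move_west_spec : Claim_equal_move_west := by
  intro platform _
  unfold Spec_move_west move_west_alt
  rw [move_west_pack]
  apply List.map_congr_left
  intro row _
  exact (pvRowAlt_eq_pack row).symm
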